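-- pv_equiv track=rewrite | github.com/vmlinuz719/ist66 | tools/assembler.py | ascii7
-- ===== SOURCE A (Python) =====
-- def ascii7(string: str) -> list[int]:
--     result = []
--     char = 0
--     shamt = 29
--
--     i = 0
--     while i < len(string):
--         if string[i] == "\\":
--             i += 1
--             octal = string[i:i+3]
--             i += 3
--             c = int(octal, 8)
--         else:
--             c = ord(string[i])
--             i += 1
--
--         char |= (c & 0x7F) << shamt
--         shamt -= 7
--         if shamt < 1:
--             shamt = 29
--             result.append(char)
--             char = 0
--     result.append(char)
--     return result
-- ===== SOURCE B (Python) =====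
-- def ascii7(string: str) -> list[int]:
--     # pass 1: decode the string into 7-bit code values (same escape rule: "\" + up to 3 chars via int(..., 8))
--     codes = []
--     i = 0
--     n = len(string)
--     while i < n:
--         if string[i] == "\\":
--             codes.append(int(string[i+1:i+4], 8))
--             i += 4
--         else:
--             codes.append(ord(string[i]))
--             i += 1
--     # pass 2: pack in chunks of five codes per 36-bit word, high bits first
--     words = []
--     for k in range(0, len(codes), 5):
--         w = 0
--         for j, c in enumerate(codes[k:k+5]):
--             w |= (c & 0x7F) << (29 - 7 * j)
--         words.append(w)
--     # A always appends the in-progress word; it is an extra zero word iff len(codes) % 5 == 0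
--     if len(codes) % 5 == 0:
--         words.append(0)
--     return words
-- ===== Notes on version B (the rewrite author's own statement) =====
-- stated objective: alternative
-- what changed: B splits A's single stateful while-loop (running char/shamt accumulators) into two passes: first decode the string into a list of 7-bit code values, then pack the codes in chunks of five with closed-form shifts 29-7*j, appending the trailing zero word exactly when len(codes) % 5 == 0 (which reproduces A's unconditional final append).
import Mathlib
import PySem

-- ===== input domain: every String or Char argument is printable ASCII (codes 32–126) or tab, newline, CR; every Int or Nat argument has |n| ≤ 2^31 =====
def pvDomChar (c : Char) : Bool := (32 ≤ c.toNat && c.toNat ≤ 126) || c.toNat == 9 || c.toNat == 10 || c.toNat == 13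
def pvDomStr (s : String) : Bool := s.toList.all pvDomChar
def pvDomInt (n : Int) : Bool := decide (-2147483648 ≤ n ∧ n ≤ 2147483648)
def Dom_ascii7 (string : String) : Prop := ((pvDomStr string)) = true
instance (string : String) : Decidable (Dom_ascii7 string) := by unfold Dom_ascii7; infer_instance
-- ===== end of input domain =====

-- B decodes the string into 7-bit codes in one pass, then packs them in chunks of five per word
-- (alternative decomposition, same cost; return value only — neither version mutates its argument).


-- ===== PORT A =====
-- int(octal, 8); the getD 0 default is never reached on inputs satisfying Pre_ascii7 (the slice parses)
def pvOct (cs : List Char) : Int := (PySem.Int.ofCharsBase? cs 8).getD 0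

-- A's while-loop; shamt.toNat is exact: at every shift shamt ∈ {29,22,15,8,1}
def ascii7Loop : List Char → Int → Int → List Int → List Int
  | [], char, _shamt, result => result ++ [char]
  | ch :: rest, char, shamt, result =>
    if ch = '\\' then
      let c := pvOct (rest.take 3)
      let char' := PySem.Int.bor char ((PySem.Int.band c 0x7F) <<< shamt.toNat)
      if shamt - 7 < 1 then ascii7Loop (rest.drop 3) 0 29 (result ++ [char'])
      else ascii7Loop (rest.drop 3) char' (shamt - 7) result
    else
      let c : Int := (ch.toNat : Int)
      let char' := PySem.Int.bor char ((PySem.Int.band c 0x7F) <<< shamt.toNat)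
      if shamt - 7 < 1 then ascii7Loop rest 0 29 (result ++ [char'])
      else ascii7Loop rest char' (shamt - 7) result
termination_by cs => cs.length
decreasing_by all_goals simp

def ascii7 (string : String) : List Int := ascii7Loop string.toList 0 29 []

-- ===== PORT B =====
-- pass 1 of Source B: decode into 7-bit code values
def decode7 : List Char → List Int
  | [] => []
  | ch :: rest =>
    if ch = '\\' then pvOct (rest.take 3) :: decode7 (rest.drop 3)
    else (ch.toNat : Int) :: decode7 rest
termination_by cs => cs.length
decreasing_by all_goals simp

-- inner for-loop of Source B: enumerate over one chunk; zipIdx's Nat index matches Python's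
-- enumerate here (indices 0..4, so the shift 29 - 7*j is the same non-negative value)
def packWord (chunk : List Int) : Int :=
  chunk.zipIdx.foldl (fun w cj => PySem.Int.bor w ((PySem.Int.band cj.1 0x7F) <<< ((29 - 7 * cj.2 : Nat)))) 0

-- for k in range(0, len(codes), 5): one word per chunk of five
def packWords : List Int → List Int
  | [] => []
  | c :: cs => packWord ((c :: cs).take 5) :: packWords ((c :: cs).drop 5)
termination_by cs => cs.length
decreasing_by simp [List.length_drop]

def ascii7_alt (string : String) : List Int :=
  let codes := decode7 string.toList
  let words := packWords codes
  if codes.length % 5 = 0 then words ++ [0] else words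

-- ===== PRECONDITION & SPEC =====
-- Pre_ excludes exactly the strings on which A raises ValueError: a backslash whose
-- following (up to 3) characters do not parse as int(..., 8).
def Pre_ascii7 (string : String) : Prop :=
  ∀ i, i < string.toList.length → string.toList[i]? = some '\\' →
    (PySem.Int.ofCharsBase? ((string.toList.drop (i + 1)).take 3) 8).isSome = true
instance (string : String) : Decidable (Pre_ascii7 string) := by unfold Pre_ascii7; infer_instance
def pvWitness_ascii7 : String := ("He\\154lo!")
def Spec_ascii7 (string : String) (out : List Int) : Prop := out = ascii7_alt string
instance (string : String) (out : List Int) : Decidable (Spec_ascii7 string out) := by unfold Spec_ascii7; infer_instance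

-- ===== CLAIM (what is proved, stated in full; the proofs are below) =====
def Claim_equal_ascii7 : Prop := ∀ (string : String), Dom_ascii7 string → Pre_ascii7 string → Spec_ascii7 string (ascii7 string)

-- ===== LEMMAS AND PROOFS =====

-- A's per-code packing step, abstracted from the characters: mirrors ascii7Loop on the code list
def packState : List Int → Int → Int → List Int → List Int
  | [], char, _shamt, result => result ++ [char]
  | c :: cs, char, shamt, result =>
    let char' := PySem.Int.bor char ((PySem.Int.band c 0x7F) <<< shamt.toNat)
    if shamt - 7 < 1 then packState cs 0 29 (result ++ [char'])
    else packState cs char' (shamt - 7) result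

theorem packState_cons (c : Int) (cs : List Int) (char shamt : Int) (result : List Int) :
    packState (c :: cs) char shamt result =
      (if shamt - 7 < 1 then
        packState cs 0 29 (result ++ [PySem.Int.bor char ((PySem.Int.band c 0x7F) <<< shamt.toNat)])
      else packState cs (PySem.Int.bor char ((PySem.Int.band c 0x7F) <<< shamt.toNat)) (shamt - 7) result) := rfl

theorem loop_eq_packState (cs : List Char) :
    ∀ char shamt result, ascii7Loop cs char shamt result = packState (decode7 cs) char shamt result := by
  match cs with
  | [] => intro char shamt result; simp [ascii7Loop, decode7, packState]
  | ch :: rest =>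
    intro char shamt result
    by_cases h : ch = '\\'
    · subst h
      simp only [ascii7Loop, decode7, if_true]
      rw [packState_cons]
      split
      · exact loop_eq_packState (rest.drop 3) 0 29 _
      · exact loop_eq_packState (rest.drop 3) _ _ _
    · simp only [ascii7Loop, decode7, if_neg h]
      rw [packState_cons]
      split
      · exact loop_eq_packState rest 0 29 _
      · exact loop_eq_packState rest _ _ _
termination_by cs.length
decreasing_by all_goals simp

theorem packState_eq (codes : List Int) :
    ∀ result, packState codes 0 29 result =
      result ++ (if codes.length % 5 = 0 then packWords codes ++ [0] else packWords codes) := by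
  match codes with
  | [] => intro result; simp [packState, packWords]
  | [a] => intro result; simp [packState, packWords, packWord, List.zipIdx]
  | [a, b] => intro result; simp [packState, packWords, packWord, List.zipIdx]
  | [a, b, c] => intro result; simp [packState, packWords, packWord, List.zipIdx]
  | [a, b, c, d] => intro result; simp [packState, packWords, packWord, List.zipIdx]
  | a :: b :: c :: d :: e :: rest =>
    intro result
    rw [show packState (a :: b :: c :: d :: e :: rest) 0 29 result =
        packState rest 0 29 (result ++ [packWord [a, b, c, d, e]]) from by
      simp [packState, packWord, List.zipIdx]]
    rw [packState_eq rest]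
    have hm : (a :: b :: c :: d :: e :: rest).length % 5 = rest.length % 5 := by
      simp [List.length_cons]; omega
    rw [show packWords (a :: b :: c :: d :: e :: rest) = packWord [a, b, c, d, e] :: packWords rest from by
      rw [packWords]; rfl, hm]
    split <;> simp
termination_by codes.length
decreasing_by all_goals simp; all_goals omega

-- ===== VERDICT (by name: the statement is the Claim_ definition above) =====
theorem ascii7_spec : Claim_equal_ascii7 := by
  intro string _dom _pre
  unfold Spec_ascii7 ascii7 ascii7_alt
  rw [loop_eq_packState, packState_eq]
  simp
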